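-- pv_equiv track=rewrite | github.com/RajRudra06/Webshield-IDS | pyScripts/feature_utils.py | matches_brand_with_substitution
-- ===== SOURCE A (Python) =====
-- def matches_brand_with_substitution(domain_text, brand_list):
--     domain_lower = domain_text.lower()
--     for brand in brand_list:
--         if brand in domain_lower:
--             return True, brand
--     substitution_map = {
--         'o': ['0'],
--         'i': ['1'],
--         'l': ['1'],
--         'e': ['3'],
--         'a': ['@'],
--         's': ['$'],
--         'g': ['9'],
--         't': ['7']
--     }
--     for brand in brand_list:
--         variations = [brand]
--         for original_char, replacements in substitution_map.items():
--             if original_char in brand: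
--                 new_variations = []
--                 for variant in variations:
--                     for replacement in replacements:
--                         new_variant = variant.replace(original_char, replacement)
--                         new_variations.append(new_variant)
--                 variations.extend(new_variations)
--         for variant in set(variations):
--             if variant in domain_lower and variant != brand:
--                 return True, brand
--     return False, None
-- ===== SOURCE B (Python) =====
-- def matches_brand_with_substitution(domain_text, brand_list):
--     domain_lower = domain_text.lower()
--     uniq = list(dict.fromkeys(brand_list))
--     for brand in uniq:
--         if brand in domain_lower:
--             return True, brand
--     sub = {'o': '0', 'i': '1', 'l': '1', 'e': '3', 'a': '@', 's': '$', 'g': '9', 't': '7'}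
--     n = len(domain_lower)
--     for brand in uniq:
--         if not any(c in sub for c in brand):
--             continue
--         m = len(brand)
--         first = brand[0]
--         alt = sub.get(first, first)
--         for start in range(n - m + 1):
--             w0 = domain_lower[start]
--             if w0 != first and w0 != alt:
--                 continue
--             window = domain_lower[start:start + m]
--             # which substitutable chars were actually substituted in this window
--             chosen = {c for c, wc in zip(brand, window) if c in sub and wc == sub[c]}
--             if chosen and all(wc == (sub[c] if c in chosen else c)
--                               for c, wc in zip(brand, window)):
--                 return True, brand
--     return False, None
-- ===== Notes on version B (the rewrite author's own statement) =====
-- stated objective: faster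
-- what changed: B deduplicates the brand list once (dict.fromkeys) and, instead of enumerating all 2^k character-substituted variants of each brand and substring-searching the domain for every variant, slides a window of the brand's length over the lowercased domain once per distinct brand (with a first-character guard) and checks in place that the window equals the brand under a consistent all-occurrences choice of substitutions with at least one substitution used.
import Mathlib
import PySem

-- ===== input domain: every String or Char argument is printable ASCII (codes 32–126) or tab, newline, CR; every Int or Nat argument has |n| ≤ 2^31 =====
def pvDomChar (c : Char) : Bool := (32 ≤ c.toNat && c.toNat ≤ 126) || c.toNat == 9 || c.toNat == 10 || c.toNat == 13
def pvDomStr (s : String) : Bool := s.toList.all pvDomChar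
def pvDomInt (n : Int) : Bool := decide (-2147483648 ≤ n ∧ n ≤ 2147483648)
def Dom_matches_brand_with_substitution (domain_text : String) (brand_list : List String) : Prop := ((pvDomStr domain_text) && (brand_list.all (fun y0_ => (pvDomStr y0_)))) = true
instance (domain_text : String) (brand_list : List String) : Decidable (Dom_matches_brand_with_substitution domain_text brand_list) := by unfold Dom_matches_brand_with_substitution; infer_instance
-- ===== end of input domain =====

-- B deduplicates the brand list once and replaces A's per-brand enumeration of all 2^k substituted
-- variants (each substring-searched) by one sliding-window scan of the domain per distinct brand,
-- checking substitution consistency in place (objective: faster; measured faster in a timing run).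

-- ===== PORT A =====
-- substitution_map.items() in insertion order (all keys distinct): a literal association list.
def pvSubItems : List (String × List String) :=
  [("o", ["0"]), ("i", ["1"]), ("l", ["1"]), ("e", ["3"]),
   ("a", ["@"]), ("s", ["$"]), ("g", ["9"]), ("t", ["7"])]

-- the 'variations' list A builds for one brand (snapshot loop + extend)
def pvVariations (brand : String) : List String :=
  pvSubItems.foldl (fun variations it =>
    if PySem.Str.isIn it.1 brand then
      variations ++ (variations.foldl (fun nv variant =>
        it.2.foldl (fun nv replacement =>
          nv ++ [PySem.Str.replace variant it.1 replacement]) nv) [])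
    else variations) [brand]

-- 'for variant in set(variations): if …: return True, brand' — the returned value does not depend
-- on which variant hits, so any over the Set's element list is exact.
def pvAHit (domain_lower brand : String) : Bool :=
  (PySem.Set.ofList (pvVariations brand)).any
    (fun v => PySem.Str.isIn v domain_lower && v != brand)

def matches_brand_with_substitution (domain_text : String) (brand_list : List String) : Bool × Option String :=
  let domain_lower := PySem.Str.lower domain_text
  match brand_list.find? (fun brand => PySem.Str.isIn brand domain_lower) with
  | some brand => (true, some brand)
  | none =>
    match brand_list.find? (fun brand => pvAHit domain_lower brand) with
    | some brand => (true, some brand)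
    | none => (false, none)

-- ===== PORT B =====
def pvSubPairs : List (Char × Char) :=
  [('o', '0'), ('i', '1'), ('l', '1'), ('e', '3'), ('a', '@'), ('s', '$'), ('g', '9'), ('t', '7')]

-- sub.get(c): first-match lookup in the literal dict
def pvSubGet (c : Char) : Option Char := (pvSubPairs.find? (fun p => p.1 == c)).map (fun p => p.2)

-- the set comprehension: which substitutable chars were actually substituted in this window
def pvChosen (b w : List Char) : PySem.Set Char :=
  PySem.Set.ofList ((b.zip w).filterMap (fun cw =>
    match pvSubGet cw.1 with
    | some r => if cw.2 == r then some cw.1 else none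
    | none => none))

-- one window: nonempty chosen set plus the consistency check
def pvWindowHit (b w : List Char) : Bool :=
  let chosen := pvChosen b w
  decide (chosen ≠ []) &&
    (b.zip w).all (fun cw => cw.2 == (if chosen.contains cw.1 then (pvSubGet cw.1).getD cw.1 else cw.1))

-- one brand of the second loop: skip brands without substitutable chars, else slide a window
-- (domain_lower[start:start+m] = (drop start).take m and domain_lower[start] = (drop start).headD,
-- exact for these natural in-range bounds; the guard guarantees b ≠ [], so ' ' is never read)
def pvBrandScan (dl b : List Char) : Bool :=
  if b.any (fun c => (pvSubGet c).isSome) then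
    let first := b.headD ' '
    let alt := (pvSubGet first).getD first
    (List.range (dl.length + 1 - b.length)).any (fun start =>
      let w0 := (dl.drop start).headD ' '
      if w0 != first && w0 != alt then false
      else pvWindowHit b ((dl.drop start).take b.length))
  else false

def matches_brand_with_substitution_alt (domain_text : String) (brand_list : List String) : Bool × Option String :=
  let dl := (PySem.Str.lower domain_text).toList
  let uniq := PySem.List.dedup brand_list
  match uniq.find? (fun brand => PySem.Chars.isIn brand.toList dl) with
  | some brand => (true, some brand)
  | none =>
    match uniq.find? (fun brand => pvBrandScan dl brand.toList) with
    | some brand => (true, some brand)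
    | none => (false, none)

-- ===== PRECONDITION & SPEC =====
def Spec_matches_brand_with_substitution (domain_text : String) (brand_list : List String) (out : Bool × Option String) : Prop := out = matches_brand_with_substitution_alt domain_text brand_list
instance (domain_text : String) (brand_list : List String) (out : Bool × Option String) : Decidable (Spec_matches_brand_with_substitution domain_text brand_list out) := by unfold Spec_matches_brand_with_substitution; infer_instance

-- ===== CLAIM (what is proved, stated in full; the proofs are below) =====
def Claim_equal_matches_brand_with_substitution : Prop := ∀ (domain_text : String) (brand_list : List String), Dom_matches_brand_with_substitution domain_text brand_list → Spec_matches_brand_with_substitution domain_text brand_list (matches_brand_with_substitution domain_text brand_list)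

-- ===== LEMMAS AND PROOFS =====

def pvKeys : List Char := ['o', 'i', 'l', 'e', 'a', 's', 'g', 't']

def pvRep (c : Char) : Char := (pvSubGet c).getD c

-- brand with every char of S (a set of substitution keys) globally replaced
def pvApply (S b : List Char) : List Char := b.map (fun c => if S.contains c then pvRep c else c)

theorem key_subGet : ∀ c ∈ pvKeys, pvSubGet c = some (pvRep c) := by
  intro c hc; fin_cases hc <;> rfl

theorem key_rep_ne : ∀ c ∈ pvKeys, pvRep c ≠ c := by
  intro c hc; fin_cases hc <;> decide

theorem key_rep_notkey : ∀ c ∈ pvKeys, pvRep c ∉ pvKeys := by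
  intro c hc; fin_cases hc <;> decide

theorem subGet_none (c : Char) (h : c ∉ pvKeys) : pvSubGet c = none := by
  have hf : pvSubPairs.find? (fun p => p.1 == c) = none := by
    rw [List.find?_eq_none]
    intro p hp hpc
    apply h
    have hc : p.1 = c := by simpa using hpc
    rw [← hc]
    fin_cases hp <;> decide
  simp [pvSubGet, hf]

theorem mem_keys_of_subGet {c r : Char} (h : pvSubGet c = some r) : c ∈ pvKeys := by
  by_contra hc
  rw [subGet_none c hc] at h
  cases h

-- a bool-equality loop over zipped equal-length lists pins down the second list
theorem zip_all_iff (f : Char → Char) :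
    ∀ (b w : List Char), w.length = b.length →
      (((b.zip w).all (fun cw => cw.2 == f cw.1)) = true ↔ w = b.map f) := by
  intro b
  induction b with
  | nil =>
    intro w h
    simp [List.length_eq_zero_iff.mp h]
  | cons x t ih =>
    intro w h
    cases w with
    | nil => simp at h
    | cons y u =>
      have h' : u.length = t.length := by simpa using h
      simp [List.zip_cons_cons, ih u h', eq_comm (a := y)]

theorem zip_self_map (l : List Char) (f : Char → Char) :
    l.zip (l.map f) = l.map (fun x => (x, f x)) := by
  have := @List.zip_map' _ _ _ id f l
  simpa using this

-- ---- characterisation of A's variations list ----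

theorem go_single (c r : Char) : ∀ (fuel : Nat) (l acc : List Char), l.length ≤ fuel →
    PySem.Chars.replace.go [c] [r] fuel l acc = acc.reverse ++ l.map (fun x => if x = c then r else x) := by
  intro fuel
  induction fuel with
  | zero =>
    intro l acc h
    interval_cases hl : l.length
    · simp_all [PySem.Chars.replace.go, List.length_eq_zero_iff.mp hl]
  | succ n ih =>
    intro l acc h
    cases l with
    | nil => simp [PySem.Chars.replace.go]
    | cons x t =>
      rw [PySem.Chars.replace.go]
      by_cases hx : x = c
      · simp [hx, List.isPrefixOf, ih t (r :: acc) (by simpa using Nat.le_of_succ_le_succ h)]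
      · simp [List.isPrefixOf, hx, ih t (x :: acc) (by simpa using Nat.le_of_succ_le_succ h)]
        intro h'; exact absurd h'.symm hx

-- str.replace with single-char arguments is a pointwise map
theorem replace_single (cs : List Char) (c r : Char) :
    PySem.Chars.replace cs [c] [r] = cs.map (fun x => if x = c then r else x) := by
  simp [PySem.Chars.replace, go_single c r cs.length cs [] le_rfl]

theorem apply_cons (c : Char) (S b : List Char) (hc : c ∈ pvKeys)
    (hS : ∀ y ∈ S, y ∈ pvKeys ∧ y ≠ c) :
    (pvApply S b).map (fun x => if x = c then pvRep c else x) = pvApply (c :: S) b := by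
  simp only [pvApply, List.map_map]
  apply List.map_congr_left
  intro y _
  simp only [Function.comp_apply]
  by_cases h1 : y ∈ S
  · have hk := hS y h1
    have hcont : S.contains y = true := List.contains_iff_mem.mpr h1
    have hcont2 : (c :: S).contains y = true :=
      List.contains_iff_mem.mpr (List.mem_cons_of_mem _ h1)
    have hrepne : pvRep y ≠ c := fun e => key_rep_notkey y hk.1 (e ▸ hc)
    rw [if_pos hcont, if_pos hcont2, if_neg hrepne]
  · have hcont : ¬ (S.contains y = true) := fun hh => h1 (List.contains_iff_mem.mp hh)
    rw [if_neg hcont]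
    by_cases h2 : y = c
    · subst h2
      rw [if_pos rfl, if_pos (List.contains_iff_mem.mpr List.mem_cons_self)]
    · have hcont2 : ¬ ((c :: S).contains y = true) := by
        intro hh
        rcases List.mem_cons.mp (List.contains_iff_mem.mp hh) with h | h
        · exact h2 h
        · exact h1 h
      rw [if_neg h2, if_neg hcont2]

theorem replace_apply (ck rk : String) (c : Char) (S b : List Char)
    (hck : ck.toList = [c]) (hrk : rk.toList = [pvRep c]) (hc : c ∈ pvKeys)
    (hS : ∀ y ∈ S, y ∈ pvKeys ∧ y ≠ c) :
    PySem.Str.replace (String.ofList (pvApply S b)) ck rk = String.ofList (pvApply (c :: S) b) := by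
  simp only [PySem.Str.replace, String.toList_ofList, hck, hrk, replace_single]
  exact congrArg String.ofList (apply_cons c S b hc hS)

theorem isIn_single_iff (ck : String) (c : Char) (hck : ck.toList = [c]) (s : String) :
    PySem.Str.isIn ck s = true ↔ c ∈ s.toList := by
  rw [PySem.Str.isIn, hck, PySem.Chars.isIn_iff_infix]
  constructor
  · intro h; exact h.subset (by simp)
  · intro h
    obtain ⟨u, t, heq⟩ := List.append_of_mem h
    exact ⟨u, t, by rw [heq]; simp⟩

-- one pass of the substitution loop, with the inner append loop already folded into a map
def pvStep (ck rk : String) (brand : String) (V : List String) : List String :=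
  if PySem.Str.isIn ck brand then V ++ V.map (fun v => PySem.Str.replace v ck rk) else V

theorem variations_eq (brand : String) :
    pvVariations brand =
      pvStep "t" "7" brand (pvStep "g" "9" brand (pvStep "s" "$" brand (pvStep "a" "@" brand
        (pvStep "e" "3" brand (pvStep "l" "1" brand (pvStep "i" "1" brand
          (pvStep "o" "0" brand [brand]))))))) := by
  simp only [pvVariations, pvSubItems, List.foldl_cons, List.foldl_nil]
  simp only [PySem.List.foldl_append_singleton_eq_map, List.nil_append, pvStep]
  rfl

def pvInv (P : List Char) (brand : String) (V : List String) : Prop :=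
  ∀ v, v ∈ V ↔ ∃ S : List Char,
    (∀ x ∈ S, x ∈ P ∧ x ∈ brand.toList) ∧ v = String.ofList (pvApply S brand.toList)

theorem apply_congr (S₁ S₂ b : List Char) (h : ∀ y, (y ∈ S₁) ↔ (y ∈ S₂)) :
    pvApply S₁ b = pvApply S₂ b := by
  simp only [pvApply]
  apply List.map_congr_left
  intro y _
  by_cases h1 : y ∈ S₁
  · simp [h1, (h y).mp h1]
  · have h2 : y ∉ S₂ := fun hy => h1 ((h y).mpr hy)
    simp [h1, h2]

theorem pvInv_nil (brand : String) : pvInv [] brand [brand] := by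
  intro v
  simp only [List.mem_singleton]
  constructor
  · rintro rfl
    exact ⟨[], by simp, by simp [pvApply, String.ofList_toList]⟩
  · rintro ⟨S, hs, rfl⟩
    have hS : S = [] := by
      cases S with
      | nil => rfl
      | cons a t => exact absurd (hs a (List.mem_cons_self)).1 (by simp)
    subst hS
    simp [pvApply, String.ofList_toList]

theorem pvStep_inv (ck rk : String) (c : Char) (P : List Char) (brand : String) (V : List String)
    (hck : ck.toList = [c]) (hrk : rk.toList = [pvRep c]) (hc : c ∈ pvKeys)
    (hcP : c ∉ P) (hP : ∀ p ∈ P, p ∈ pvKeys) (hV : pvInv P brand V) :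
    pvInv (c :: P) brand (pvStep ck rk brand V) := by
  intro v
  rw [pvStep]
  by_cases ht : PySem.Str.isIn ck brand = true
  · have hcb : c ∈ brand.toList := (isIn_single_iff ck c hck brand).mp ht
    rw [if_pos ht]
    simp only [List.mem_append, List.mem_map]
    constructor
    · rintro (hv | ⟨v0, hv0, rfl⟩)
      · obtain ⟨S, hs, rfl⟩ := (hV v).mp hv
        exact ⟨S, fun x hx => ⟨List.mem_cons_of_mem _ (hs x hx).1, (hs x hx).2⟩, rfl⟩
      · obtain ⟨S, hs, rfl⟩ := (hV v0).mp hv0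
        refine ⟨c :: S, ?_, ?_⟩
        · intro x hx0
          rcases List.mem_cons.mp hx0 with rfl | hx
          · exact ⟨List.mem_cons_self, hcb⟩
          · exact ⟨List.mem_cons_of_mem _ (hs x hx).1, (hs x hx).2⟩
        · exact replace_apply ck rk c S brand.toList hck hrk hc
            (fun y hy => ⟨hP _ (hs y hy).1, fun e => hcP (e ▸ (hs y hy).1)⟩)
    · rintro ⟨S, hs, rfl⟩
      by_cases hcS : c ∈ S
      · right
        have hfil : ∀ y ∈ S.filter (fun y => y ≠ c), y ∈ pvKeys ∧ y ≠ c := by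
          intro y hy
          rw [List.mem_filter] at hy
          have hyP := (hs y hy.1).1
          have hyne : y ≠ c := by simpa using hy.2
          rcases List.mem_cons.mp hyP with h | h
          · exact absurd h hyne
          · exact ⟨hP _ h, hyne⟩
        refine ⟨String.ofList (pvApply (S.filter (fun y => y ≠ c)) brand.toList), ?_, ?_⟩
        · apply (hV _).mpr
          refine ⟨S.filter (fun y => y ≠ c), ?_, rfl⟩
          intro x hx
          rw [List.mem_filter] at hx
          have hxP := (hs x hx.1).1
          have hxne : x ≠ c := by simpa using hx.2
          rcases List.mem_cons.mp hxP with h | h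
          · exact absurd h hxne
          · exact ⟨h, (hs x hx.1).2⟩
        · rw [replace_apply ck rk c _ brand.toList hck hrk hc hfil]
          apply congrArg String.ofList
          apply apply_congr
          intro y
          constructor
          · intro hy0
            rcases List.mem_cons.mp hy0 with rfl | hy
            · exact hcS
            · exact (List.mem_filter.mp hy).1
          · intro hy
            by_cases hyc : y = c
            · exact hyc ▸ List.mem_cons_self
            · exact List.mem_cons_of_mem _ (List.mem_filter.mpr ⟨hy, by simpa using hyc⟩)
      · left
        apply (hV _).mpr
        refine ⟨S, fun x hx => ?_, rfl⟩
        rcases List.mem_cons.mp (hs x hx).1 with h | h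
        · exact absurd (h ▸ hx) hcS
        · exact ⟨h, (hs x hx).2⟩
  · rw [if_neg ht]
    have hcb : c ∉ brand.toList := fun h => ht ((isIn_single_iff ck c hck brand).mpr h)
    rw [hV v]
    constructor
    · rintro ⟨S, hs, rfl⟩
      exact ⟨S, fun x hx => ⟨List.mem_cons_of_mem _ (hs x hx).1, (hs x hx).2⟩, rfl⟩
    · rintro ⟨S, hs, rfl⟩
      refine ⟨S, fun x hx => ?_, rfl⟩
      rcases List.mem_cons.mp (hs x hx).1 with h | h
      · exact absurd ((h : x = c) ▸ (hs x hx).2) hcb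
      · exact ⟨h, (hs x hx).2⟩

theorem variations_iff (brand : String) :
    ∀ v, v ∈ pvVariations brand ↔ ∃ S : List Char,
      (∀ x ∈ S, x ∈ pvKeys ∧ x ∈ brand.toList) ∧ v = String.ofList (pvApply S brand.toList) := by
  have h0 := pvInv_nil brand
  have h1 := pvStep_inv "o" "0" 'o' [] brand _ (by decide) (by decide) (by decide) (by simp) (by simp) h0
  have h2 := pvStep_inv "i" "1" 'i' ['o'] brand _ (by decide) (by decide) (by decide) (by decide) (by intro p hp; fin_cases hp; decide) h1
  have h3 := pvStep_inv "l" "1" 'l' ['i', 'o'] brand _ (by decide) (by decide) (by decide) (by decide) (by intro p hp; fin_cases hp <;> decide) h2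
  have h4 := pvStep_inv "e" "3" 'e' ['l', 'i', 'o'] brand _ (by decide) (by decide) (by decide) (by decide) (by intro p hp; fin_cases hp <;> decide) h3
  have h5 := pvStep_inv "a" "@" 'a' ['e', 'l', 'i', 'o'] brand _ (by decide) (by decide) (by decide) (by decide) (by intro p hp; fin_cases hp <;> decide) h4
  have h6 := pvStep_inv "s" "$" 's' ['a', 'e', 'l', 'i', 'o'] brand _ (by decide) (by decide) (by decide) (by decide) (by intro p hp; fin_cases hp <;> decide) h5
  have h7 := pvStep_inv "g" "9" 'g' ['s', 'a', 'e', 'l', 'i', 'o'] brand _ (by decide) (by decide) (by decide) (by decide) (by intro p hp; fin_cases hp <;> decide) h6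
  have h8 := pvStep_inv "t" "7" 't' ['g', 's', 'a', 'e', 'l', 'i', 'o'] brand _ (by decide) (by decide) (by decide) (by decide) (by intro p hp; fin_cases hp <;> decide) h7
  intro v
  rw [variations_eq brand, h8 v]
  constructor
  · rintro ⟨S, hs, rfl⟩
    refine ⟨S, fun x hx => ⟨?_, (hs x hx).2⟩, rfl⟩
    have := (hs x hx).1
    revert this
    simp [pvKeys]
    tauto
  · rintro ⟨S, hs, rfl⟩
    refine ⟨S, fun x hx => ⟨?_, (hs x hx).2⟩, rfl⟩
    have := (hs x hx).1
    revert this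
    simp [pvKeys]
    tauto

-- ---- A's per-brand test in closed form ----

theorem apply_ne_self (S : List Char) (b : String)
    (hs : ∀ x ∈ S, x ∈ pvKeys ∧ x ∈ b.toList) (hne : S ≠ []) :
    String.ofList (pvApply S b.toList) ≠ b := by
  obtain ⟨x, hx⟩ : ∃ x, x ∈ S := by
    cases S with
    | nil => exact absurd rfl hne
    | cons a t => exact ⟨a, List.mem_cons_self⟩
  intro h
  have h2 : pvApply S b.toList = b.toList := by
    have := congrArg String.toList h
    rwa [String.toList_ofList] at this
  obtain ⟨i, hi, hib⟩ := List.mem_iff_getElem.mp (hs x hx).2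
  have hcx : S.contains x = true := List.contains_iff_mem.mpr hx
  have h3 := congrArg (fun l => l[i]?) h2
  simp only [pvApply, List.getElem?_map] at h3
  rw [List.getElem?_eq_getElem hi, hib] at h3
  simp only [Option.map_some, Option.some.injEq, hcx, if_true] at h3
  exact key_rep_ne x (hs x hx).1 h3

theorem aHit_iff (dlS b : String) :
    pvAHit dlS b = true ↔ ∃ S : List Char,
      (∀ x ∈ S, x ∈ pvKeys ∧ x ∈ b.toList) ∧ S ≠ [] ∧
      PySem.Chars.isIn (pvApply S b.toList) dlS.toList = true := by
  rw [pvAHit, List.any_eq_true]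
  constructor
  · rintro ⟨v, hv, hp⟩
    rw [PySem.Set.mem_ofList] at hv
    obtain ⟨S, hs, rfl⟩ := (variations_iff b v).mp hv
    simp only [Bool.and_eq_true, bne_iff_ne, ne_eq] at hp
    obtain ⟨hin, hne⟩ := hp
    refine ⟨S, hs, ?_, ?_⟩
    · rintro rfl
      exact hne (by simp [pvApply, String.ofList_toList])
    · rw [PySem.Str.isIn, String.toList_ofList] at hin
      exact hin
  · rintro ⟨S, hs, hne, hin⟩
    refine ⟨String.ofList (pvApply S b.toList), ?_, ?_⟩
    · rw [PySem.Set.mem_ofList]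
      exact (variations_iff b _).mpr ⟨S, hs, rfl⟩
    · simp only [Bool.and_eq_true, bne_iff_ne, ne_eq]
      refine ⟨?_, apply_ne_self S b hs hne⟩
      rw [PySem.Str.isIn, String.toList_ofList]
      exact hin

-- ---- substring test as a window scan ----

theorem isIn_window_iff (v dl : List Char) :
    PySem.Chars.isIn v dl = true ↔
      ∃ start, start ∈ List.range (dl.length + 1 - v.length) ∧ (dl.drop start).take v.length = v := by
  rw [PySem.Chars.isIn_iff_infix]
  constructor
  · rintro ⟨s, t, rfl⟩
    refine ⟨s.length, ?_, ?_⟩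
    · simp [List.mem_range]
      omega
    · rw [List.append_assoc, List.drop_left, List.take_left]
  · rintro ⟨start, hs, hw⟩
    have hsplit := List.take_append_drop v.length (dl.drop start)
    rw [hw] at hsplit
    refine ⟨dl.take start, (dl.drop start).drop v.length, ?_⟩
    rw [List.append_assoc, hsplit, List.take_append_drop]

-- ---- B's window check in closed form ----

theorem mem_chosen_iff (b w : List Char) (x : Char) :
    x ∈ pvChosen b w ↔ ∃ cw ∈ b.zip w, cw.1 = x ∧ pvSubGet x = some cw.2 := by
  rw [pvChosen, PySem.Set.mem_ofList, List.mem_filterMap]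
  constructor
  · rintro ⟨cw, hcw, hg⟩
    cases hsg : pvSubGet cw.1 with
    | none => simp [hsg] at hg
    | some r =>
      rw [hsg] at hg
      dsimp only at hg
      by_cases hr : (cw.2 == r) = true
      · rw [if_pos hr] at hg
        cases hg
        exact ⟨cw, hcw, rfl, by rw [hsg]; exact congrArg some (beq_iff_eq.mp hr).symm⟩
      · rw [if_neg hr] at hg
        cases hg
  · rintro ⟨cw, hcw, rfl, hsg⟩
    refine ⟨cw, hcw, ?_⟩
    rw [hsg]
    dsimp only
    rw [if_pos (by simp)]

theorem chosen_eq_S (S b' : List Char) (hgood : ∀ x ∈ S, x ∈ pvKeys ∧ x ∈ b') :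
    ∀ x, x ∈ pvChosen b' (pvApply S b') ↔ x ∈ S := by
  intro x
  rw [mem_chosen_iff]
  have hzip : b'.zip (pvApply S b') =
      b'.map (fun c => (c, if S.contains c then pvRep c else c)) := by
    rw [pvApply, zip_self_map]
  rw [hzip]
  constructor
  · rintro ⟨cw, hcw, hx1, hsg⟩
    obtain ⟨c, hcb, rfl⟩ := List.mem_map.mp hcw
    dsimp only at hx1 hsg
    subst hx1
    by_cases hcS : c ∈ S
    · exact hcS
    · exfalso
      have hcont : ¬ (S.contains c = true) := fun hh => hcS (List.contains_iff_mem.mp hh)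
      rw [if_neg hcont] at hsg
      have hck := mem_keys_of_subGet hsg
      rw [key_subGet c hck] at hsg
      exact key_rep_ne c hck (Option.some.injEq _ _ ▸ hsg)
  · intro hxS
    refine ⟨(x, if S.contains x then pvRep x else x),
      List.mem_map.mpr ⟨x, (hgood x hxS).2, rfl⟩, rfl, ?_⟩
    dsimp only
    rw [if_pos (List.contains_iff_mem.mpr hxS)]
    exact key_subGet x (hgood x hxS).1

theorem windowHit_iff (b' w : List Char) (hl : w.length = b'.length) :
    pvWindowHit b' w = true ↔ ∃ S : List Char,
      (∀ x ∈ S, x ∈ pvKeys ∧ x ∈ b') ∧ S ≠ [] ∧ w = pvApply S b' := by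
  rw [pvWindowHit]
  simp only [Bool.and_eq_true, decide_eq_true_eq]
  constructor
  · rintro ⟨hne, hall⟩
    refine ⟨pvChosen b' w, ?_, hne, ?_⟩
    · intro x hx
      obtain ⟨cw, hcw, hx1, hsg⟩ := (mem_chosen_iff b' w x).mp hx
      exact ⟨mem_keys_of_subGet hsg, hx1 ▸ (List.of_mem_zip hcw).1⟩
    · exact (zip_all_iff (fun c => if (pvChosen b' w).contains c then pvRep c else c) b' w hl).mp hall
  · rintro ⟨S, hgood, hSne, rfl⟩
    have hCS : ∀ c, ((pvChosen b' (pvApply S b')).contains c) = S.contains c := by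
      intro c
      rw [Bool.eq_iff_iff, PySem.Set.contains_iff, List.contains_iff_mem]
      exact chosen_eq_S S b' hgood c
    obtain ⟨x, hx⟩ : ∃ x, x ∈ S := by
      cases S with
      | nil => exact absurd rfl hSne
      | cons a t => exact ⟨a, List.mem_cons_self⟩
    have hz : b'.zip (pvApply S b') =
        b'.map (fun c => (c, if S.contains c then pvRep c else c)) := by
      rw [pvApply, zip_self_map]
    refine ⟨List.ne_nil_of_mem ((chosen_eq_S S b' hgood x).mpr hx), ?_⟩
    rw [hz, List.all_map, List.all_eq_true]
    intro c hc
    simp only [Function.comp_apply]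
    rw [hCS c]
    by_cases hcs : S.contains c = true
    · rw [if_pos hcs, if_pos hcs]
      exact beq_iff_eq.mpr rfl
    · rw [if_neg hcs, if_neg hcs]
      exact beq_iff_eq.mpr rfl

-- ---- B's per-brand scan in closed form ----

theorem headD_take (l : List Char) (m : Nat) (hm : 0 < m) (d : Char) :
    (List.take m l).headD d = l.headD d := by
  cases m with
  | zero => omega
  | succ k => cases l <;> simp

-- a hitting window opens with the brand's first char or its substitution
theorem windowHit_head (b w : List Char) (hb : b ≠ []) (hl : w.length = b.length)
    (hw : pvWindowHit b w = true) :
    w.headD ' ' = b.headD ' ' ∨ w.headD ' ' = pvRep (b.headD ' ') := by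
  obtain ⟨S, _hg, _hn, rfl⟩ := (windowHit_iff b w hl).mp hw
  cases b with
  | nil => exact absurd rfl hb
  | cons b0 rest =>
    rw [pvApply]
    simp only [List.map_cons, List.headD_cons]
    by_cases hc : S.contains b0 = true
    · rw [if_pos hc]; right; rfl
    · rw [if_neg hc]; left; rfl

theorem bScan_iff (dl b' : List Char) :
    pvBrandScan dl b' = true ↔ ∃ S : List Char,
      (∀ x ∈ S, x ∈ pvKeys ∧ x ∈ b') ∧ S ≠ [] ∧
      PySem.Chars.isIn (pvApply S b') dl = true := by
  simp only [pvBrandScan]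
  by_cases hk : b'.any (fun c => (pvSubGet c).isSome) = true
  · rw [if_pos hk, List.any_eq_true]
    have hbne : b' ≠ [] := by
      obtain ⟨x, hxb, _⟩ := List.any_eq_true.mp hk
      exact List.ne_nil_of_mem hxb
    have hm1 : 0 < b'.length := List.length_pos_iff.mpr hbne
    have hlenap : ∀ S : List Char, (pvApply S b').length = b'.length := by
      intro S; simp [pvApply]
    constructor
    · rintro ⟨start, hsr, hbody⟩
      by_cases hg : ((dl.drop start).headD ' ' != b'.headD ' ' &&
          (dl.drop start).headD ' ' != (pvSubGet (b'.headD ' ')).getD (b'.headD ' ')) = true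
      · rw [if_pos hg] at hbody; cases hbody
      · rw [if_neg hg] at hbody
        have hlen : ((dl.drop start).take b'.length).length = b'.length := by
          rw [List.mem_range] at hsr
          simp
          omega
        obtain ⟨S, hgood, hSne, hws⟩ := (windowHit_iff b' _ hlen).mp hbody
        refine ⟨S, hgood, hSne, ?_⟩
        rw [isIn_window_iff]
        exact ⟨start, by rwa [hlenap S], by rw [hlenap S, ← hws]⟩
    · rintro ⟨S, hgood, hSne, hin⟩
      rw [isIn_window_iff] at hin
      obtain ⟨start, hsr, hwin⟩ := hin
      rw [hlenap S] at hsr hwin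
      have hlen : ((dl.drop start).take b'.length).length = b'.length := by
        rw [List.mem_range] at hsr
        simp
        omega
      have hwh : pvWindowHit b' ((dl.drop start).take b'.length) = true :=
        (windowHit_iff b' _ hlen).mpr ⟨S, hgood, hSne, hwin⟩
      refine ⟨start, hsr, ?_⟩
      have hd := windowHit_head b' _ hbne hlen hwh
      rw [headD_take (dl.drop start) b'.length hm1 ' '] at hd
      have hgf : ((dl.drop start).headD ' ' != b'.headD ' ' &&
          (dl.drop start).headD ' ' != (pvSubGet (b'.headD ' ')).getD (b'.headD ' ')) = false := by
        rcases hd with h | h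
        · rw [h, bne_self_eq_false, Bool.false_and]
        · rw [h]
          have hra : (pvSubGet (b'.headD ' ')).getD (b'.headD ' ') = pvRep (b'.headD ' ') := rfl
          rw [hra, bne_self_eq_false, Bool.and_false]
      rw [if_neg (fun hh => Bool.false_ne_true (hgf ▸ hh))]
      exact hwh
  · rw [if_neg hk]
    constructor
    · intro h; cases h
    · rintro ⟨S, hgood, hSne, _⟩
      exfalso
      obtain ⟨x, hx⟩ : ∃ x, x ∈ S := by
        cases S with
        | nil => exact absurd rfl hSne
        | cons a t => exact ⟨a, List.mem_cons_self⟩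
      apply hk
      rw [List.any_eq_true]
      exact ⟨x, (hgood x hx).2, by rw [key_subGet x (hgood x hx).1]; rfl⟩

-- a first-match search over the deduplicated list finds the same element
theorem find?_foldl_add (p : String → Bool) :
    ∀ (l acc : List String),
      List.find? p (l.foldl PySem.Set.add acc) = (List.find? p acc).or (List.find? p l) := by
  intro l
  induction l with
  | nil =>
    intro acc
    cases h : List.find? p acc <;> simp [List.foldl_nil, h]
  | cons x t ih =>
    intro acc
    rw [List.foldl_cons, ih]
    by_cases hx : x ∈ acc
    · rw [show PySem.Set.add acc x = acc from by simp [PySem.Set.add, hx]]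
      cases hacc : List.find? p acc with
      | some a => simp
      | none =>
        have hxmem : x ∈ acc := hx
        have hpx : ¬ p x = true := by
          intro hp
          rw [List.find?_eq_none] at hacc
          exact hacc x hxmem hp
        simp [hpx]
    · rw [show PySem.Set.add acc x = acc ++ [x] from by simp [PySem.Set.add, hx]]
      rw [List.find?_append]
      cases hacc : List.find? p acc with
      | some a => simp
      | none =>
        by_cases hpx : p x = true
        · simp [hpx]
        · simp [hpx]

theorem find?_dedup (p : String → Bool) (l : List String) :
    List.find? p (PySem.List.dedup l) = List.find? p l := by
  rw [PySem.List.dedup, PySem.Set.ofList_eq_foldl, find?_foldl_add]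
  simp

-- the two per-brand tests agree
theorem hit_iff (dlS b : String) : pvAHit dlS b = pvBrandScan dlS.toList b.toList := by
  rw [Bool.eq_iff_iff, aHit_iff, bScan_iff]

-- ===== VERDICT (by name: the statement is the Claim_ definition above) =====
theorem matches_brand_with_substitution_spec : Claim_equal_matches_brand_with_substitution := by
  intro domain_text brand_list _
  unfold Spec_matches_brand_with_substitution
  simp only [matches_brand_with_substitution, matches_brand_with_substitution_alt]
  have e2 : (fun brand => pvAHit (PySem.Str.lower domain_text) brand) =
      (fun brand => pvBrandScan (PySem.Str.lower domain_text).toList brand.toList) :=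
    funext fun b => hit_iff _ b
  rw [find?_dedup, find?_dedup, e2]
  rfl
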